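/- GENERATED by c/gen_decode.py: decode facts of the image, one per distinct instruction byte string. -/
import UserX.DecodeImage

#decode_all ProgX.Base.Dec
  "0f8689000000"  -- jbe 1024f7
  "4189f6"  -- mov r14d,esi
  "4883c301"  -- add rbx,0x1
  "4889ca"  -- mov rdx,rcx
  "488d4207"  -- lea rax,[rdx+0x7]
  "4983e5f0"  -- and r13,0xfffffffffffffff0
  "4c89442408"  -- mov QWORD PTR [rsp+0x8],r8
  "660f28e2"  -- movapd xmm4,xmm2
  "72c9"  -- jb 101220
  "7507"  -- jne 100b62
  "7d32"  -- jge 1022b6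
  "89fd"  -- mov ebp,edi
  "c6870000c00000"  -- mov BYTE PTR [rdi+0xc00000],0x0
  "e891eeffff"  -- call 100300
  "e8e9f2ffff"  -- call 100200
  "ebdd"  -- jmp 102d05
  "f20f2cfa"  -- cvttsd2si edi,xmm2
  "f20f5915b3da0300"  -- mulsd xmm2,QWORD PTR [rip+0x3dab3]
  "f20f5e1560e00300"  -- divsd xmm2,QWORD PTR [rip+0x3e060]
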